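-- pv_equiv track=rewrite | github.com/Basement-Friends/models | web-api/toxic-messages/webapp/app.py | remove_punctuations_and_digits
-- ===== SOURCE A (Python) =====
-- import string
--
-- def remove_punctuations_and_digits(text : str):
--     to_remove = string.punctuation + string.digits
--     cur_text = ''
--     for i in range(len(text)):
--         if text[i] in to_remove:
--             cur_text += ' '
--         else:
--             cur_text += text[i]
--     cur_text = ' '.join(cur_text.split())
--     return cur_text
-- ===== SOURCE B (Python) =====
-- import string
--
-- def remove_punctuations_and_digits(text : str):
--     to_remove = string.punctuation + string.digits
--     words = []
--     current = ''
--     for c in text: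
--         if c in to_remove or c.isspace():
--             if current:
--                 words.append(current)
--                 current = ''
--         else:
--             current += c
--     if current:
--         words.append(current)
--     return ' '.join(words)
-- ===== Notes on version B (the rewrite author's own statement) =====
-- stated objective: alternative
-- what changed: B is a single-pass tokenizer that emits words directly while scanning, instead of A's building a translated copy of the string character by character and then splitting and re-joining it.
import Mathlib
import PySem

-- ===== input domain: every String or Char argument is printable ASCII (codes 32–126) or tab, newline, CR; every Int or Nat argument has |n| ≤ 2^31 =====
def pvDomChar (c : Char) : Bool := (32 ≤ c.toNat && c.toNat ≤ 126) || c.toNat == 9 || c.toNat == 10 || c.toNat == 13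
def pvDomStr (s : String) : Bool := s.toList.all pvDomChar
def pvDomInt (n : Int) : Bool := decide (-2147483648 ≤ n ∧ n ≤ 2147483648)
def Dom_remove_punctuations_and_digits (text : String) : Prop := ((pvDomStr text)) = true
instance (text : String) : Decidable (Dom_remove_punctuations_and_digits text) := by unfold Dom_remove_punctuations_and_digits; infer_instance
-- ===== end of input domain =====

-- B replaces A's translate-then-split (repeated string concatenation, then split/join) by a single-pass tokenizer emitting words directly.

-- string.punctuation + string.digits
def pvToRemove : List Char := "!\"#$%&'()*+,-./:;<=>?@[\\]^_`{|}~0123456789".toList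

-- ===== PORT A =====
def remove_punctuations_and_digits (text : String) : String :=
  let cur := text.toList.foldl
    (fun acc c => acc ++ [if pvToRemove.contains c then ' ' else c]) []
  String.ofList (PySem.Chars.join [' '] (PySem.Chars.split₀ cur))

-- ===== PORT B =====
def remove_punctuations_and_digits_alt (text : String) : String :=
  let st := text.toList.foldl
    (fun (st : List (List Char) × List Char) c =>
      if pvToRemove.contains c || PySem.Chars.isspace c then
        (if st.2.isEmpty then st.1 else st.1 ++ [st.2], [])
      else (st.1, st.2 ++ [c]))
    ([], [])
  String.ofList (PySem.Chars.join [' ']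
    (if st.2.isEmpty then st.1 else st.1 ++ [st.2]))

-- ===== PRECONDITION & SPEC =====
def Spec_remove_punctuations_and_digits (text : String) (out : String) : Prop := out = remove_punctuations_and_digits_alt text
instance (text : String) (out : String) : Decidable (Spec_remove_punctuations_and_digits text out) := by unfold Spec_remove_punctuations_and_digits; infer_instance

-- ===== CLAIM (what is proved, stated in full; the proofs are below) =====
def Claim_equal_remove_punctuations_and_digits : Prop := ∀ (text : String), Dom_remove_punctuations_and_digits text → Spec_remove_punctuations_and_digits text (remove_punctuations_and_digits text)

-- ===== LEMMAS AND PROOFS =====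

-- B's separator predicate (proof-only)
def pvSep (c : Char) : Bool := pvToRemove.contains c || PySem.Chars.isspace c

-- reference tokenizer (proof-only)
def pvTok : List Char → List Char → List (List Char)
  | [], cur => if cur.isEmpty then [] else [cur]
  | c :: rest, cur =>
      if pvSep c then (if cur.isEmpty then pvTok rest [] else cur :: pvTok rest [])
      else pvTok rest (cur ++ [c])

theorem pv_map_f (s : List Char) (acc : List Char) :
    s.foldl (fun acc c => acc ++ [if pvToRemove.contains c then ' ' else c]) acc
      = acc ++ s.map (fun c => if pvToRemove.contains c then ' ' else c) := by
  induction s generalizing acc with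
  | nil => simp
  | cons c rest ih =>
    rw [List.foldl_cons, ih, List.map_cons]
    simp

theorem pv_isspace_f (c : Char) :
    PySem.Chars.isspace (if pvToRemove.contains c then ' ' else c) = pvSep c := by
  unfold pvSep
  by_cases h : pvToRemove.contains c = true
  · rw [if_pos h, h, Bool.true_or]
    decide
  · rw [if_neg h, Bool.not_eq_true] at *
    rw [h, Bool.false_or]

theorem pv_contains_of_not_sep (c : Char) (hs : ¬ pvSep c = true) :
    pvToRemove.contains c = false := by
  revert hs; unfold pvSep; cases pvToRemove.contains c <;> simp

theorem pv_go_eq (s : List Char) (cur : List Char) (acc : List (List Char)) :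
    PySem.Chars.split₀.go (s.map (fun c => if pvToRemove.contains c then ' ' else c)) cur acc
      = acc.reverse ++ pvTok s cur.reverse := by
  induction s generalizing cur acc with
  | nil =>
    rw [List.map_nil]
    unfold PySem.Chars.split₀.go pvTok
    by_cases h : cur.isEmpty = true
    · have h2 : cur.reverse.isEmpty = true := by
        rw [List.isEmpty_iff] at *; simp [h]
      rw [if_pos h, if_pos h2, List.append_nil]
    · have h2 : ¬ cur.reverse.isEmpty = true := by
        rw [List.isEmpty_iff] at *; simp [h]
      rw [if_neg h, if_neg h2]
      simp
  | cons c rest ih =>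
    rw [List.map_cons]
    unfold PySem.Chars.split₀.go pvTok
    rw [pv_isspace_f]
    by_cases hs : pvSep c = true
    · rw [if_pos hs, if_pos hs]
      by_cases h : cur.isEmpty = true
      · have h2 : cur.reverse.isEmpty = true := by
          rw [List.isEmpty_iff] at *; simp [h]
        rw [if_pos h, if_pos h2, ih]
        rfl
      · have h2 : ¬ cur.reverse.isEmpty = true := by
          rw [List.isEmpty_iff] at *; simp [h]
        rw [if_neg h, if_neg h2, ih]
        simp
    · have hc := pv_contains_of_not_sep c hs
      rw [if_neg hs, if_neg hs]
      have hfc : (if pvToRemove.contains c then ' ' else c) = c := by rw [hc]; rfl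
      rw [hfc, ih]
      simp

theorem pv_alt_eq (s : List Char) (words : List (List Char)) (cur : List Char) :
    (if (s.foldl
        (fun (st : List (List Char) × List Char) c =>
          if pvToRemove.contains c || PySem.Chars.isspace c then
            (if st.2.isEmpty then st.1 else st.1 ++ [st.2], [])
          else (st.1, st.2 ++ [c])) (words, cur)).2.isEmpty
      then (s.foldl
        (fun (st : List (List Char) × List Char) c =>
          if pvToRemove.contains c || PySem.Chars.isspace c then
            (if st.2.isEmpty then st.1 else st.1 ++ [st.2], [])
          else (st.1, st.2 ++ [c])) (words, cur)).1
      else (s.foldl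
        (fun (st : List (List Char) × List Char) c =>
          if pvToRemove.contains c || PySem.Chars.isspace c then
            (if st.2.isEmpty then st.1 else st.1 ++ [st.2], [])
          else (st.1, st.2 ++ [c])) (words, cur)).1 ++ [(s.foldl
        (fun (st : List (List Char) × List Char) c =>
          if pvToRemove.contains c || PySem.Chars.isspace c then
            (if st.2.isEmpty then st.1 else st.1 ++ [st.2], [])
          else (st.1, st.2 ++ [c])) (words, cur)).2])
      = words ++ pvTok s cur := by
  induction s generalizing words cur with
  | nil =>
    rw [List.foldl_nil]
    unfold pvTok
    dsimp only
    by_cases h : cur.isEmpty = true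
    · rw [if_pos h, if_pos h, List.append_nil]
    · rw [if_neg h, if_neg h]
  | cons c rest ih =>
    rw [List.foldl_cons]
    unfold pvTok
    by_cases hs : pvSep c = true
    · have hs' : (pvToRemove.contains c || PySem.Chars.isspace c) = true := hs
      rw [if_pos hs', if_pos hs]
      dsimp only
      by_cases h : cur.isEmpty = true
      · rw [if_pos h, if_pos h, ih]
      · rw [if_neg h, if_neg h, ih]
        simp
    · have hs' : ¬ (pvToRemove.contains c || PySem.Chars.isspace c) = true := hs
      rw [if_neg hs', if_neg hs]
      exact ih words (cur ++ [c])

-- ===== VERDICT (by name: the statement is the Claim_ definition above) =====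
theorem remove_punctuations_and_digits_spec : Claim_equal_remove_punctuations_and_digits := by
  intro text _
  unfold Spec_remove_punctuations_and_digits remove_punctuations_and_digits remove_punctuations_and_digits_alt
  simp only [pv_map_f, List.nil_append, PySem.Chars.split₀]
  rw [pv_go_eq, pv_alt_eq]
  rfl
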